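-- pv_equiv track=rewrite | github.com/hihihahali/leetcode | test2.py | check
-- ===== SOURCE A (Python) =====
-- def check(s,k):
--     n=len(s)
--     sub=""
--     count=0
--     for i in range(0,n):
--         if s[i] not in sub:
--             sub=sub+s[i]
--     for char in sub:
--         for i in range(0,n):
--             if char == s[i]:
--                 count=count+1
--         if count%k!=0:
--             return 0
--     return 1
-- ===== SOURCE B (Python) =====
-- from collections import Counter
--
-- def check(s, k):
--     # every character's frequency must be divisible by k
--     return 1 if all(c % k == 0 for c in Counter(s).values()) else 0
-- ===== Notes on version B (the rewrite author's own statement) =====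
-- stated objective: faster
-- what changed: A rescans the whole string once per distinct character with a running (never reset) count; B builds a Counter in one pass and checks each frequency for divisibility by k -- equivalent because all cumulative sums are divisible by k iff each summand is. Pre_ excludes k = 0 with nonempty s, where Python's % raises ZeroDivisionError in both.
import Mathlib
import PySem

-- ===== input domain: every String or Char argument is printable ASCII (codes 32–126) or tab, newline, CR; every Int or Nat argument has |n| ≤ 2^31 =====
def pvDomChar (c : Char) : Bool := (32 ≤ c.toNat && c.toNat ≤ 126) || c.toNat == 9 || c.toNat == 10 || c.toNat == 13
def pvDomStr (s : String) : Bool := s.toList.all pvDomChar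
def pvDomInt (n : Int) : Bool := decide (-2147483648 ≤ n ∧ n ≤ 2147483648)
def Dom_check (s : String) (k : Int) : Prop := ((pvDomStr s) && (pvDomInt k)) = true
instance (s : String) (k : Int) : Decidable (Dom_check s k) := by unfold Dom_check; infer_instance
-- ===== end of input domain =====

-- B replaces A's per-distinct-character rescans of the string by a single Counter pass
-- checking each frequency's divisibility by k (asymptotically faster).


-- ===== PORT A =====
-- second loop of A: for char in sub, rescan all of s adding to the running count,
-- early return 0 when count % k != 0
def checkLoopA (cs : List Char) (k : Int) : List Char → Int → Int
  | [], _ => 1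
  | ch :: rest, count =>
    let count := cs.foldl (fun acc c => if ch = c then acc + 1 else acc) count
    if PySem.Int.mod count k ≠ 0 then 0 else checkLoopA cs k rest count

-- "s[i] not in sub": substring test on a one-char needle = char membership
def check (s : String) (k : Int) : Int :=
  checkLoopA s.toList k
    (s.toList.foldl (fun sub c => if c ∈ sub then sub else sub ++ [c]) []) 0

-- ===== PORT B =====
-- all frequencies of Counter(s) divisible by k
def check_alt (s : String) (k : Int) : Int :=
  if (PySem.Dict.counter s.toList : PySem.Dict Char Int).values.all
      (fun c => PySem.Int.mod c k == 0) then 1 else 0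

-- ===== PRECONDITION & SPEC =====
-- Pre_ excludes k = 0 with s nonempty, where Python's `count % k` (resp. `c % k`) raises ZeroDivisionError in both A and B.
def Pre_check (s : String) (k : Int) : Prop := k ≠ 0 ∨ s = ""
instance (s : String) (k : Int) : Decidable (Pre_check s k) := by unfold Pre_check; infer_instance
def pvWitness_check : String × Int := ("abca", 2)

def Spec_check (s : String) (k : Int) (out : Int) : Prop := out = check_alt s k
instance (s : String) (k : Int) (out : Int) : Decidable (Spec_check s k out) := by unfold Spec_check; infer_instance

-- ===== CLAIM =====
def Claim_equal_check : Prop := ∀ (s : String) (k : Int), Dom_check s k → Pre_check s k → Spec_check s k (check s k)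

-- ===== LEMMAS AND PROOFS =====

-- A's inner rescan adds the full count of ch to the accumulator
theorem foldl_count_add (ch : Char) (cs : List Char) (n : Int) :
    cs.foldl (fun acc c => if ch = c then acc + 1 else acc) n = n + cs.count ch := by
  induction cs generalizing n with
  | nil => simp
  | cons c rest ih =>
    rcases eq_or_ne ch c with h | h
    · subst h
      rw [List.foldl_cons, if_pos rfl, ih, List.count_cons_self]
      push_cast; ring
    · rw [List.foldl_cons, if_neg h, ih]
      simp [Ne.symm h]

-- shifting by a multiple of k does not change divisibility of the running count
theorem mod_add_zero_iff (k t x : Int) (ht : PySem.Int.mod t k = 0) :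
    PySem.Int.mod (t + x) k = 0 ↔ PySem.Int.mod x k = 0 := by
  rw [PySem.Int.mod_eq_zero_iff_dvd, PySem.Int.mod_eq_zero_iff_dvd]
  rw [PySem.Int.mod_eq_zero_iff_dvd] at ht
  constructor
  · intro h; simpa using (Int.dvd_sub h ht)
  · intro h; exact Int.dvd_add ht h

-- A's loop with a k-divisible accumulator decides "every listed char's count divisible by k"
theorem loopA_eq_all (cs : List Char) (k : Int) (sub : List Char) (t : Int)
    (ht : PySem.Int.mod t k = 0) :
    checkLoopA cs k sub t
      = if sub.all (fun ch => PySem.Int.mod (cs.count ch) k == 0) then 1 else 0 := by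
  induction sub generalizing t with
  | nil => simp [checkLoopA]
  | cons ch rest ih =>
    simp only [checkLoopA, foldl_count_add]
    by_cases h : PySem.Int.mod ((cs.count ch : Int)) k = 0
    · have h' : PySem.Int.mod (t + cs.count ch) k = 0 :=
        (mod_add_zero_iff k t _ ht).mpr h
      rw [if_neg (by simpa using h'), ih _ h']
      simp [h]
    · have h' : PySem.Int.mod (t + cs.count ch) k ≠ 0 := by
        intro hc; exact h ((mod_add_zero_iff k t _ ht).mp hc)
      rw [if_pos h']
      simp [List.all_cons, h]

-- A's first loop builds exactly set-of-list (first occurrences, in order)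
theorem sub_eq_ofList (cs : List Char) :
    cs.foldl (fun sub c => if c ∈ sub then sub else sub ++ [c]) [] = PySem.Set.ofList cs := by
  rw [PySem.Set.ofList_eq_foldl]
  congr 1
  funext sub c
  simp [PySem.Set.add, PySem.Set.contains]

-- B's condition: the counter's values are the counts of the distinct characters
theorem values_counter_all (cs : List Char) (p : Int → Bool) :
    (PySem.Dict.counter cs : PySem.Dict Char Int).values.all p
      = (PySem.Set.ofList cs).all (fun ch => p (cs.count ch)) := by
  simp only [PySem.Dict.values, PySem.Dict.items_counter, List.map_map, List.all_map]
  rfl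

theorem check_spec' (s : String) (k : Int) : check s k = check_alt s k := by
  unfold check check_alt
  rw [sub_eq_ofList, loopA_eq_all _ _ _ 0 (by simp [PySem.Int.mod]),
      values_counter_all]

-- ===== VERDICT =====
theorem check_spec : Claim_equal_check := by
  intro s k _ hpre
  exact check_spec' s k
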